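-- pv_equiv track=rewrite | github.com/abidhm77/InfoSentinel-Elite-Platform | backend/scanners/directory_scanner.py | _is_interesting_path
-- ===== SOURCE A (Python) =====
-- def _is_interesting_path(path: str) -> bool:
--     """Check if path is particularly interesting"""
--     interesting_keywords = [
--         'admin', 'login', 'config', 'backup', 'database', 'sql',
--         'password', 'secret', 'private', 'internal', 'debug',
--         'test', 'dev', 'staging', 'api', 'upload', 'download'
--     ]
--
--     path_lower = path.lower()
--     return any(keyword in path_lower for keyword in interesting_keywords)
-- ===== SOURCE B (Python) =====
-- def _is_interesting_path(path: str) -> bool: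
--     """Check if path is particularly interesting"""
--     interesting_keywords = (
--         'admin', 'login', 'config', 'backup', 'database', 'sql',
--         'password', 'secret', 'private', 'internal', 'debug',
--         'test', 'dev', 'staging', 'api', 'upload', 'download'
--     )
--     path_lower = path.lower()
--     # single left-to-right scan: at each position test all keywords at once
--     for i in range(len(path_lower)):
--         if path_lower.startswith(interesting_keywords, i):
--             return True
--     return False
-- ===== Notes on version B (the rewrite author's own statement) =====
-- stated objective: alternative
-- what changed: Replaces the keyword-major any(kw in path) of k independent substring searches with a single position-major left-to-right scan that at each index tests all keywords at once via str.startswith with a tuple.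
import Mathlib
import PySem

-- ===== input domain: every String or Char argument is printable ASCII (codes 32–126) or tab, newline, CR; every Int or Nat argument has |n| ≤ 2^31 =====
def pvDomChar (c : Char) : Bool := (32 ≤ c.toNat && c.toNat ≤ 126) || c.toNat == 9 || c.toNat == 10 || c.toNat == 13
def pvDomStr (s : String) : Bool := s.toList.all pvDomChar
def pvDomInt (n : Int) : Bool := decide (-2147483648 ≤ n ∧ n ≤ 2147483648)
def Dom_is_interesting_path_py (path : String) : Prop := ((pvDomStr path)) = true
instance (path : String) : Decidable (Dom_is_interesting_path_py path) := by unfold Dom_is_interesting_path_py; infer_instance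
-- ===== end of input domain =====

-- B replaces the keyword-major any(kw in path) with a single position-major scan
-- testing all keywords at each index (alternative traversal, same cost class).

-- ===== PORT A =====
def pvInterestingKeywords : List String :=
  ["admin", "login", "config", "backup", "database", "sql",
   "password", "secret", "private", "internal", "debug",
   "test", "dev", "staging", "api", "upload", "download"]

def is_interesting_path_py (path : String) : Bool :=
  let path_lower := PySem.Str.lower path
  pvInterestingKeywords.any (fun keyword => PySem.Str.isIn keyword path_lower)

-- ===== PORT B =====
-- the same keyword tuple, as character lists (B matches them positionally)
def pvScanKeywords : List (List Char) :=
  ["admin".toList, "login".toList, "config".toList, "backup".toList,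
   "database".toList, "sql".toList, "password".toList, "secret".toList,
   "private".toList, "internal".toList, "debug".toList, "test".toList,
   "dev".toList, "staging".toList, "api".toList, "upload".toList,
   "download".toList]

-- the loop 'for i in range(len(p)): if p.startswith(keywords, i)' over the suffixes of p
def pvScan (kws : List (List Char)) : List Char → Bool
  | [] => false
  | c :: t => kws.any (fun k => k.isPrefixOf (c :: t)) || pvScan kws t

def is_interesting_path_py_alt (path : String) : Bool :=
  pvScan pvScanKeywords (PySem.Chars.lower path.toList)

-- ===== PRECONDITION & SPEC =====
def Spec_is_interesting_path_py (path : String) (out : Bool) : Prop := out = is_interesting_path_py_alt path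
instance (path : String) (out : Bool) : Decidable (Spec_is_interesting_path_py path out) := by unfold Spec_is_interesting_path_py; infer_instance

-- ===== CLAIM (what is proved, stated in full; the proofs are below) =====
def Claim_equal_is_interesting_path_py : Prop := ∀ (path : String), Dom_is_interesting_path_py path → Spec_is_interesting_path_py path (is_interesting_path_py path)

-- ===== LEMMAS AND PROOFS =====

theorem pvScan_iff (kws : List (List Char)) (hne : ∀ k ∈ kws, k ≠ []) :
    ∀ cs, pvScan kws cs = true ↔ ∃ k ∈ kws, k <:+: cs := by
  intro cs
  induction cs with
  | nil =>
    simp only [pvScan]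
    constructor
    · intro h; exact absurd h (by simp)
    rintro ⟨k, hk, hinf⟩
    exact absurd (List.eq_nil_of_infix_nil hinf) (hne k hk)
  | cons c t ih =>
    simp only [pvScan, Bool.or_eq_true, List.any_eq_true, ih,
      List.isPrefixOf_iff_prefix, List.infix_cons_iff]
    constructor
    · rintro (⟨k, hk, hp⟩ | ⟨k, hk, hi⟩)
      · exact ⟨k, hk, Or.inl hp⟩
      · exact ⟨k, hk, Or.inr hi⟩
    · rintro ⟨k, hk, hp | hi⟩
      · exact Or.inl ⟨k, hk, hp⟩
      · exact Or.inr ⟨k, hk, hi⟩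

theorem pvScanKeywords_eq : pvScanKeywords = pvInterestingKeywords.map String.toList := rfl

theorem pvScanKeywords_ne_nil : ∀ k ∈ pvScanKeywords, k ≠ ([] : List Char) := by decide

-- ===== VERDICT (by name: the statement is the Claim_ definition above) =====
theorem is_interesting_path_py_spec : Claim_equal_is_interesting_path_py := by
  intro path _
  show is_interesting_path_py path = is_interesting_path_py_alt path
  unfold is_interesting_path_py is_interesting_path_py_alt
  rw [Bool.eq_iff_iff]
  rw [pvScan_iff pvScanKeywords pvScanKeywords_ne_nil, pvScanKeywords_eq]
  simp only [List.any_eq_true, PySem.Str.isIn_eq, PySem.Chars.isIn_iff_infix,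
    PySem.Str.toList_lower, List.mem_map]
  constructor
  · rintro ⟨k, hk, hinf⟩
    exact ⟨k.toList, ⟨k, hk, rfl⟩, hinf⟩
  · rintro ⟨_, ⟨k, hk, rfl⟩, hinf⟩
    exact ⟨k, hk, hinf⟩
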